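-- pv_equiv track=rewrite | github.com/coolgenerator/ScholarPath | scholarpath/chat/orchestrator_v2.py | _inject_profile_read_capability
-- ===== SOURCE A (Python) =====
-- _PROFILE_DEPENDENT_CAPABILITIES = {
--     "recommendation_subagent",
--     "school_query",
--     "strategy",
--     "offer_compare",
--     "what_if",
-- }
--
-- def _inject_profile_read_capability(unique: list[str]) -> list[str]:
--     has_dependent = any(item in _PROFILE_DEPENDENT_CAPABILITIES for item in unique)
--     if not has_dependent:
--         return unique
--     if "profile_read" in unique:
--         return unique
--     first_dependent = next(
--         (idx for idx, item in enumerate(unique) if item in _PROFILE_DEPENDENT_CAPABILITIES),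
--         0,
--     )
--     out = list(unique)
--     out.insert(first_dependent, "profile_read")
--     return out
-- ===== SOURCE B (Python) =====
-- _PROFILE_DEPENDENT_CAPABILITIES = {
--     "recommendation_subagent",
--     "school_query",
--     "strategy",
--     "offer_compare",
--     "what_if",
-- }
--
-- def _inject_profile_read_capability(unique: list[str]) -> list[str]:
--     # single pass: bail out as soon as profile_read is seen; remember first dependent index
--     first_dep = None
--     for idx, item in enumerate(unique):
--         if item == "profile_read":
--             return unique
--         if first_dep is None and item in _PROFILE_DEPENDENT_CAPABILITIES:
--             first_dep = idx
--     if first_dep is None: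
--         return unique
--     out = list(unique)
--     out.insert(first_dep, "profile_read")
--     return out
-- ===== Notes on version B (the rewrite author's own statement) =====
-- stated objective: simpler
-- what changed: Replaces A's three separate scans (any, membership test, enumerate-next) with a single loop that returns early on 'profile_read' and records the first dependent index.
import Mathlib
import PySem

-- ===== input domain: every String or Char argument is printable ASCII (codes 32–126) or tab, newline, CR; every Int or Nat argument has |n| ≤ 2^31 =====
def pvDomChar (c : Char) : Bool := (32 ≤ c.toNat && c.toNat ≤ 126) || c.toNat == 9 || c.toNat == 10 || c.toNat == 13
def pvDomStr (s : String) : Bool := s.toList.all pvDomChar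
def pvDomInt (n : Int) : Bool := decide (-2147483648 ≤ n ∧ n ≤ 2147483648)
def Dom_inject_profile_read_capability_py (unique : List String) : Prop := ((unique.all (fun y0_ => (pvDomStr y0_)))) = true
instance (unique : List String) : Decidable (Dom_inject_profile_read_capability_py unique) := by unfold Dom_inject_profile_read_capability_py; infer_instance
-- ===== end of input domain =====

-- B merges A's three scans (any, membership, enumerate-next) into one early-returning pass; return value only.

-- the module-level set _PROFILE_DEPENDENT_CAPABILITIES
def pvProfileDeps : List String :=
  ["recommendation_subagent", "school_query", "strategy", "offer_compare", "what_if"]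

-- ===== PORT A =====
def inject_profile_read_capability_py (unique : List String) : List String :=
  let has_dependent := unique.any (fun item => pvProfileDeps.contains item)
  if !has_dependent then unique
  else if unique.contains "profile_read" then unique
  else
    -- next((idx for idx, item in enumerate(unique) if item in S), 0)
    let first_dependent := (unique.findIdx? (fun item => pvProfileDeps.contains item)).getD 0
    PySem.List.insert unique (first_dependent : Int) "profile_read"

-- ===== PORT B =====
-- the for-loop of B: returns none when 'profile_read' was hit (early return of unique),
-- otherwise some first_dep, the accumulator after the full pass
def pvBLoop (xs : List String) (idx : Nat) (first_dep : Option Nat) : Option (Option Nat) :=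
  match xs with
  | [] => some first_dep
  | item :: rest =>
    if item = "profile_read" then none
    else pvBLoop rest (idx + 1)
      (if first_dep.isNone && pvProfileDeps.contains item then some idx else first_dep)

def inject_profile_read_capability_py_alt (unique : List String) : List String :=
  match pvBLoop unique 0 none with
  | none => unique
  | some none => unique
  | some (some i) => PySem.List.insert unique (i : Int) "profile_read"

-- ===== PRECONDITION & SPEC =====
def Spec_inject_profile_read_capability_py (unique : List String) (out : List String) : Prop := out = inject_profile_read_capability_py_alt unique
instance (unique : List String) (out : List String) : Decidable (Spec_inject_profile_read_capability_py unique out) := by unfold Spec_inject_profile_read_capability_py; infer_instance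

-- ===== CLAIM (what is proved, stated in full; the proofs are below) =====
def Claim_equal_inject_profile_read_capability_py : Prop := ∀ (unique : List String), Dom_inject_profile_read_capability_py unique → Spec_inject_profile_read_capability_py unique (inject_profile_read_capability_py unique)

-- ===== LEMMAS AND PROOFS =====

-- once the accumulator is some j it stays some j (unless profile_read aborts the loop)
theorem pvBLoop_some (xs : List String) (i j : Nat) (h : "profile_read" ∉ xs) :
    pvBLoop xs i (some j) = some (some j) := by
  induction xs generalizing i with
  | nil => rfl
  | cons x rest ih =>
    simp only [List.mem_cons, not_or] at h
    have hx : ¬ x = "profile_read" := fun he => h.1 he.symm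
    simp [pvBLoop, hx, ih _ h.2]

-- the loop aborts (returns none) exactly when profile_read occurs in the remaining list
theorem pvBLoop_eq_none_iff (xs : List String) (i : Nat) (a : Option Nat) :
    pvBLoop xs i a = none ↔ "profile_read" ∈ xs := by
  induction xs generalizing i a with
  | nil => simp [pvBLoop]
  | cons x rest ih =>
    by_cases hx : x = "profile_read"
    · simp [pvBLoop, hx]
    · simp [pvBLoop, hx, ih, Ne.symm hx]

-- with no profile_read, the loop computes the first dependent index, offset by the start index
theorem pvBLoop_none_eq (xs : List String) (i : Nat) (h : "profile_read" ∉ xs) :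
    pvBLoop xs i none =
      some ((xs.findIdx? (fun item => pvProfileDeps.contains item)).map (· + i)) := by
  induction xs generalizing i with
  | nil => rfl
  | cons x rest ih =>
    simp only [List.mem_cons, not_or] at h
    have hx : ¬ x = "profile_read" := fun he => h.1 he.symm
    by_cases hp : x ∈ pvProfileDeps
    · simp [pvBLoop, hx, hp, pvBLoop_some rest (i + 1) i h.2, List.findIdx?_cons]
    · have hall := ih (i + 1) h.2
      simp only [List.contains_eq_mem] at hall
      simp [pvBLoop, hx, hp, hall, List.findIdx?_cons]
      cases rest.findIdx? (fun item => decide (item ∈ pvProfileDeps)) with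
      | none => rfl
      | some k => simp; omega

-- ===== VERDICT (by name: the statement is the Claim_ definition above) =====
theorem inject_profile_read_capability_py_spec : Claim_equal_inject_profile_read_capability_py := by
  intro unique _
  show inject_profile_read_capability_py unique = inject_profile_read_capability_py_alt unique
  unfold inject_profile_read_capability_py inject_profile_read_capability_py_alt
  by_cases hpr : "profile_read" ∈ unique
  · rw [(pvBLoop_eq_none_iff unique 0 none).2 hpr]
    simp [hpr]
  · rw [pvBLoop_none_eq unique 0 hpr]
    cases hf : unique.findIdx? (fun item => pvProfileDeps.contains item) with
    | none =>
      have hdep : unique.any (fun item => pvProfileDeps.contains item) = false := by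
        rw [List.findIdx?_eq_none_iff] at hf
        simpa using hf
      have hforall : ∀ x ∈ unique, x ∉ pvProfileDeps := by simpa using hdep
      simp only [List.contains_eq_mem] at hf
      simp
      intro x hx hxd _
      exact absurd hxd (hforall x hx)
    | some k =>
      have hne : ¬ (∀ x ∈ unique, x ∉ pvProfileDeps) := by
        rcases List.findIdx?_eq_some_iff_getElem.1 hf with ⟨hlt, hpk, -⟩
        exact fun hall => hall _ (List.getElem_mem _) (by simpa using hpk)
      simp only [List.contains_eq_mem] at hf
      simp [hne, hpr]
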